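-- pv_equiv track=rewrite | github.com/Savin99/telemost-transcriber | tg-bot/meeting_metadata.py | transcript_text_for_metadata
-- ===== SOURCE A (Python) =====
-- def transcript_text_for_metadata(transcript: dict, max_chars: int = 18000) -> str:
--     parts: list[str] = []
--     for segment in transcript.get("segments", []):
--         speaker = str(segment.get("speaker") or "Unknown").strip()
--         text = str(segment.get("text") or "").strip()
--         if not text:
--             continue
--         parts.append(f"{speaker}: {text}")
--         if sum(len(part) for part in parts) >= max_chars:
--             break
--     text = "\n".join(parts)
--     return text[:max_chars]
-- ===== SOURCE B (Python) =====
-- def _fmt(segment):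
--     speaker = str(segment.get("speaker") or "Unknown").strip()
--     text = str(segment.get("text") or "").strip()
--     return f"{speaker}: {text}" if text else None
--
--
-- def transcript_text_for_metadata(transcript: dict, max_chars: int = 18000) -> str:
--     # Staged pipeline instead of an early-exit loop: format every segment,
--     # build the prefix-sum table of part lengths, binary-search the cut point,
--     # then join and clip.
--     parts = [p for p in map(_fmt, transcript.get("segments", [])) if p is not None]
--     cums = []
--     total = 0
--     for p in parts:
--         total += len(p)
--         cums.append(total)
--     lo, hi = 0, len(cums)
--     while lo < hi:
--         mid = (lo + hi) // 2
--         if cums[mid] >= max_chars: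
--             hi = mid
--         else:
--             lo = mid + 1
--     kept = min(lo + 1, len(parts))
--     return "\n".join(parts[:kept])[:max_chars]
-- ===== Notes on version B (the rewrite author's own statement) =====
-- stated objective: alternative
-- what changed: B replaces A's single loop with an in-loop re-summation and early break by a staged pipeline: format all segments, build the prefix-sum table of part lengths, binary-search the first prefix sum reaching max_chars to get the cut index, then join the kept prefix and clip; A's break point equals that binary-search cut because prefix sums are monotone.
import Mathlib
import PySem

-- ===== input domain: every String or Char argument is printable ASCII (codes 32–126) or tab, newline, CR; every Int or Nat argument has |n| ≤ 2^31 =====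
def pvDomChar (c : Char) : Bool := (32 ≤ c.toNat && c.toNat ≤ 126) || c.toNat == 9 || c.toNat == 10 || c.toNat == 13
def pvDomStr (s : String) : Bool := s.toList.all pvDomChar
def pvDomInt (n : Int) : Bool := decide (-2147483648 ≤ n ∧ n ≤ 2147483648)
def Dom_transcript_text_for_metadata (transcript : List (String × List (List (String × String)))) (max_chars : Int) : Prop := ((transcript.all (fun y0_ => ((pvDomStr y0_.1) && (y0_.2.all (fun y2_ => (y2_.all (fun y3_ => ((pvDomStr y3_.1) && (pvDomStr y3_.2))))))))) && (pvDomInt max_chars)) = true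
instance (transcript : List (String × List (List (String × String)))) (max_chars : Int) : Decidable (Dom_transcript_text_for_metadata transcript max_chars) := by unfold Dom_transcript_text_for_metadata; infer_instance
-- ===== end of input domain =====

-- B replaces A's early-exit loop (which re-sums all part lengths each iteration) by a staged
-- pipeline: format all segments, prefix-sum the part lengths, binary-search the cut, join, clip.

-- ===== PORT A =====
-- dict.get k (first match in the association list)
def pvGet {α : Type} (d : List (String × α)) (k : String) : Option α :=
  (d.find? (fun p => p.1 == k)).map (·.2)

-- `x or dflt` on an optional string: None and "" are falsy
def pvOrDefault (o : Option String) (dflt : String) : String :=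
  match o with
  | none => dflt
  | some s => if s = "" then dflt else s

-- A's loop body: appends, then re-sums the lengths of ALL parts to decide on break
def pvALoop (segs : List (List (String × String))) (parts : List String) (max_chars : Int) :
    List String :=
  match segs with
  | [] => parts
  | seg :: rest =>
    let speaker := PySem.Str.strip (pvOrDefault (pvGet seg "speaker") "Unknown")
    let text := PySem.Str.strip (pvOrDefault (pvGet seg "text") "")
    if text = "" then pvALoop rest parts max_chars
    else
      let parts' := parts ++ [speaker ++ ": " ++ text]
      if ((parts'.map (fun p => (PySem.Str.len p : Int))).sum ≥ max_chars) then parts'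
      else pvALoop rest parts' max_chars

def transcript_text_for_metadata (transcript : List (String × List (List (String × String)))) (max_chars : Int) : String :=
  let parts := pvALoop ((pvGet transcript "segments").getD []) [] max_chars
  PySem.Str.slice (PySem.Str.join "\n" parts) none (some max_chars)

-- ===== PORT B =====
-- B's _fmt helper: the formatted part, or none when the stripped text is empty
def pvFmt (seg : List (String × String)) : Option String :=
  let speaker := PySem.Str.strip (pvOrDefault (pvGet seg "speaker") "Unknown")
  let text := PySem.Str.strip (pvOrDefault (pvGet seg "text") "")
  if text = "" then none else some (speaker ++ ": " ++ text)

-- B's prefix-sum loop over the part lengths, carrying (cums, total)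
def pvCumLoop (parts : List String) (st : List Int × Int) : List Int × Int :=
  parts.foldl (fun st p => (st.1 ++ [st.2 + (PySem.Str.len p : Int)],
                            st.2 + (PySem.Str.len p : Int))) st

-- B's hand-written binary search (bisect_left): first index with cums[i] >= mc.
-- cums[mid] is always in range in the Python loop; getD 0 is the total port of that access.
def pvBS (cums : List Int) (mc : Int) (lo hi : Nat) : Nat :=
  if lo < hi then
    if mc ≤ cums.getD ((lo + hi) / 2) 0 then pvBS cums mc lo ((lo + hi) / 2)
    else pvBS cums mc ((lo + hi) / 2 + 1) hi
  else lo
termination_by hi - lo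
decreasing_by all_goals omega

def transcript_text_for_metadata_alt (transcript : List (String × List (List (String × String)))) (max_chars : Int) : String :=
  let parts := ((pvGet transcript "segments").getD []).filterMap pvFmt
  let cums := (pvCumLoop parts ([], 0)).1
  let lo := pvBS cums max_chars 0 cums.length
  let kept := min (lo + 1) parts.length
  PySem.Str.slice (PySem.Str.join "\n" (parts.take kept)) none (some max_chars)

-- ===== PRECONDITION & SPEC =====
def Spec_transcript_text_for_metadata (transcript : List (String × List (List (String × String)))) (max_chars : Int) (out : String) : Prop := out = transcript_text_for_metadata_alt transcript max_chars
instance (transcript : List (String × List (List (String × String)))) (max_chars : Int) (out : String) : Decidable (Spec_transcript_text_for_metadata transcript max_chars out) := by unfold Spec_transcript_text_for_metadata; infer_instance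

-- ===== CLAIM (what is proved, stated in full; the proofs are below) =====
def Claim_equal_transcript_text_for_metadata : Prop := ∀ (transcript : List (String × List (List (String × String)))) (max_chars : Int), Dom_transcript_text_for_metadata transcript max_chars → Spec_transcript_text_for_metadata transcript max_chars (transcript_text_for_metadata transcript max_chars)

-- ===== LEMMAS AND PROOFS =====

-- reference prefix-sum list starting from total t
def pvCumsFrom (t : Int) : List String → List Int
  | [] => []
  | p :: rest => (t + (PySem.Str.len p : Int)) :: pvCumsFrom (t + (PySem.Str.len p : Int)) rest

-- reference cut: keep parts until the running total reaches the budget (inclusive)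
def pvCut (ps : List String) (b : Int) : List String :=
  match ps with
  | [] => []
  | p :: rest =>
    if b - (PySem.Str.len p : Int) ≤ 0 then [p]
    else p :: pvCut rest (b - (PySem.Str.len p : Int))

theorem pvCumLoop_eq (ps : List String) (acc : List Int) (t : Int) :
    pvCumLoop ps (acc, t) =
      (acc ++ pvCumsFrom t ps, t + (ps.map (fun p => (PySem.Str.len p : Int))).sum) := by
  induction ps generalizing acc t with
  | nil => simp [pvCumLoop, pvCumsFrom]
  | cons p rest ih =>
    simp only [pvCumLoop, List.foldl_cons, pvCumsFrom] at *
    rw [ih]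
    simp [List.append_assoc]
    ring

theorem pvCumsFrom_length (t : Int) (ps : List String) :
    (pvCumsFrom t ps).length = ps.length := by
  induction ps generalizing t with
  | nil => rfl
  | cons p rest ih => simp [pvCumsFrom, ih]

theorem pvCumsFrom_le (t : Int) (ps : List String) :
    ∀ x ∈ pvCumsFrom t ps, t ≤ x := by
  induction ps generalizing t with
  | nil => simp [pvCumsFrom]
  | cons p rest ih =>
    intro x hx
    simp only [pvCumsFrom, List.mem_cons] at hx
    have hlen : (0 : Int) ≤ (PySem.Str.len p : Int) := by simp
    rcases hx with rfl | hx
    · omega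
    · have := ih (t + (PySem.Str.len p : Int)) x hx; omega

theorem pvCumsFrom_mono (t : Int) (ps : List String) :
    ∀ i j, i ≤ j → j < ps.length →
      (pvCumsFrom t ps).getD i 0 ≤ (pvCumsFrom t ps).getD j 0 := by
  induction ps generalizing t with
  | nil => intro i j _ hj; simp at hj
  | cons p rest ih =>
    intro i j hij hj
    match i, j with
    | 0, 0 => exact le_refl _
    | 0, j + 1 =>
      simp only [pvCumsFrom, List.getD_cons_zero, List.getD_cons_succ]
      have hjr : j < rest.length := by simpa using hj
      have hlen : (0 : Int) ≤ (PySem.Str.len p : Int) := by simp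
      have hjl : j < (pvCumsFrom (t + (PySem.Str.len p : Int)) rest).length := by
        rw [pvCumsFrom_length]; exact hjr
      have hmem : (pvCumsFrom (t + (PySem.Str.len p : Int)) rest).getD j 0
          ∈ pvCumsFrom (t + (PySem.Str.len p : Int)) rest := by
        rw [List.getD_eq_getElem _ _ hjl]
        exact List.getElem_mem hjl
      have := pvCumsFrom_le _ _ _ hmem
      omega
    | i + 1, j + 1 =>
      simp only [pvCumsFrom, List.getD_cons_succ]
      exact ih _ i j (by omega) (by simpa using hj)

theorem pvCumsFrom_shift (t : Int) (ps : List String) :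
    pvCumsFrom t ps = (pvCumsFrom 0 ps).map (· + t) := by
  induction ps generalizing t with
  | nil => rfl
  | cons p rest ih =>
    simp only [pvCumsFrom, List.map_cons, zero_add]
    congr 1
    · omega
    · rw [ih, ih (PySem.Str.len p : Int), List.map_map]
      congr 1
      funext x
      simp; omega

theorem pvCumsFrom_getD_shift (t : Int) (ps : List String) (i : Nat)
    (hi : i < ps.length) :
    (pvCumsFrom t ps).getD i 0 = (pvCumsFrom 0 ps).getD i 0 + t := by
  rw [pvCumsFrom_shift]
  have h0 : i < (pvCumsFrom 0 ps).length := by rw [pvCumsFrom_length]; exact hi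
  have h1 : i < ((pvCumsFrom 0 ps).map (· + t)).length := by simpa using h0
  rw [List.getD_eq_getElem _ _ h1, List.getD_eq_getElem _ _ h0, List.getElem_map]

-- A's loop, started with accumulated parts, is those parts followed by the reference cut
theorem pvALoop_eq_cut (segs : List (List (String × String))) (parts : List String)
    (mc : Int) :
    pvALoop segs parts mc
      = parts ++ pvCut (segs.filterMap pvFmt)
          (mc - (parts.map (fun p => (PySem.Str.len p : Int))).sum) := by
  induction segs generalizing parts with
  | nil => simp [pvALoop, pvCut]
  | cons seg rest ih =>
    simp only [pvALoop, pvFmt, List.filterMap_cons]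
    split
    · exact ih parts
    · simp only [pvCut]
      rw [ih]
      simp only [List.map_append, List.sum_append, List.map_cons, List.map_nil,
        List.sum_cons, List.sum_nil, add_zero, List.append_assoc, List.cons_append,
        List.nil_append]
      split_ifs with h1 h2 h2
      · rfl
      · omega
      · omega
      · simp only [sub_sub]
        rfl

theorem pvBS_spec (cums : List Int) (mc : Int) (lo hi : Nat)
    (hhi : hi ≤ cums.length) (hlo : lo ≤ hi)
    (mono : ∀ i j, i ≤ j → j < cums.length → cums.getD i 0 ≤ cums.getD j 0)
    (hl : ∀ i < lo, cums.getD i 0 < mc)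
    (hh : ∀ i, hi ≤ i → i < cums.length → mc ≤ cums.getD i 0) :
    (∀ i < pvBS cums mc lo hi, cums.getD i 0 < mc) ∧
      pvBS cums mc lo hi ≤ cums.length ∧
      (∀ i, pvBS cums mc lo hi ≤ i → i < cums.length → mc ≤ cums.getD i 0) := by
  rw [pvBS]
  split
  · rename_i h
    split
    · rename_i hm
      exact pvBS_spec cums mc lo ((lo + hi) / 2) (by omega) (by omega) mono hl
        (fun i hi1 hi2 => le_trans hm (mono _ i (by omega) hi2))
    · rename_i hm
      rw [not_le] at hm
      exact pvBS_spec cums mc ((lo + hi) / 2 + 1) hi (by omega) (by omega) mono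
        (fun i hi1 => lt_of_le_of_lt (mono i _ (by omega) (by omega)) hm) hh
  · exact ⟨fun i hi1 => hl i hi1, by omega, fun i hi1 hi2 => hh i (by omega) hi2⟩
termination_by hi - lo
decreasing_by all_goals omega

-- the cut equals the kept prefix determined by the bisect index r
theorem pvCut_eq_take (ps : List String) (b : Int) (r : Nat)
    (h1 : ∀ i < r, (pvCumsFrom 0 ps).getD i 0 < b)
    (h2 : ∀ i, r ≤ i → i < ps.length → b ≤ (pvCumsFrom 0 ps).getD i 0)
    (hr : r ≤ ps.length) :
    pvCut ps b = ps.take (min (r + 1) ps.length) := by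
  induction ps generalizing b r with
  | nil => simp [pvCut]
  | cons p rest ih =>
    have hcz : (pvCumsFrom 0 (p :: rest)).getD 0 0 = (PySem.Str.len p : Int) := by
      simp [pvCumsFrom]
    have hcs : ∀ i, i < rest.length →
        (pvCumsFrom 0 (p :: rest)).getD (i + 1) 0
          = (pvCumsFrom 0 rest).getD i 0 + (PySem.Str.len p : Int) := by
      intro i hi
      simp only [pvCumsFrom, zero_add, List.getD_cons_succ]
      exact pvCumsFrom_getD_shift _ rest i hi
    simp only [pvCut]
    split_ifs with hb
    · have hr0 : r = 0 := by
        by_contra hne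
        have := h1 0 (by omega)
        rw [hcz] at this
        omega
      subst hr0
      simp
    · have hr1 : 1 ≤ r := by
        by_contra hne
        have := h2 0 (by omega) (by simp)
        rw [hcz] at this
        omega
      obtain ⟨r', rfl⟩ : ∃ r', r = r' + 1 := ⟨r - 1, by omega⟩
      have hlen : r' ≤ rest.length := by simpa using hr
      rw [ih (b - (PySem.Str.len p : Int)) r'
        (fun i hi => by
          have hir : i < rest.length := by omega
          have := h1 (i + 1) (by omega)
          rw [hcs i hir] at this
          omega)
        (fun i hri hir => by
          have := h2 (i + 1) (by omega) (by simpa using Nat.succ_lt_succ hir)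
          rw [hcs i hir] at this
          omega)
        hlen]
      have : min (r' + 1 + 1) (p :: rest).length = min (r' + 1) rest.length + 1 := by
        simp only [List.length_cons]
        omega
      rw [this, List.take_succ_cons]

-- ===== VERDICT (by name: the statement is the Claim_ definition above) =====
theorem transcript_text_for_metadata_spec : Claim_equal_transcript_text_for_metadata := by
  intro transcript mc _
  unfold Spec_transcript_text_for_metadata
  simp only [transcript_text_for_metadata, transcript_text_for_metadata_alt]
  generalize (pvGet transcript "segments").getD [] = segs
  have hcums : (pvCumLoop (segs.filterMap pvFmt) ([], 0)).1
      = pvCumsFrom 0 (segs.filterMap pvFmt) := by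
    rw [pvCumLoop_eq]; simp
  rw [hcums, pvALoop_eq_cut]
  simp only [List.map_nil, List.sum_nil, sub_zero, List.nil_append]
  have hclen : (pvCumsFrom 0 (segs.filterMap pvFmt)).length = (segs.filterMap pvFmt).length :=
    pvCumsFrom_length 0 _
  obtain ⟨H1, Hle, H2⟩ := pvBS_spec (pvCumsFrom 0 (segs.filterMap pvFmt)) mc 0
    (pvCumsFrom 0 (segs.filterMap pvFmt)).length (le_refl _) (by omega)
    (fun i j hij hj => pvCumsFrom_mono 0 _ i j hij (by omega))
    (fun i hi => by omega)
    (fun i hi1 hi2 => by omega)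
  rw [pvCut_eq_take _ mc _ H1 (fun i hri hir => H2 i hri (by omega)) (by omega)]
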